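-- pv_equiv track=rewrite | github.com/branjam4/Computational-Linguistics | nlphw5.py | longest_words
-- ===== SOURCE A (Python) =====
-- def longest_words(lst_words):
--     '''
--     Given a list of words, write a function to find all of the longest words, and
--     return a set of those words.
--     '''
--     key = {v.lower() for v in lst_words}
--     keys = sorted(key) #I just wanted to sort
--     counts = [len([v for v in word]) for word in keys]
--     dict_word_counts = {k:v for (k,v) in zip(keys, counts)}
--     longest_word_length = max(dict_word_counts.values())
--     long_words = [w for w in dict_word_counts if len(w) == longest_word_length]
--     return(long_words)
-- ===== SOURCE B (Python) =====
-- def longest_words(lst_words):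
--     buckets = {}
--     for word in sorted({v.lower() for v in lst_words}):
--         buckets.setdefault(len(word), []).append(word)
--     return buckets[max(buckets)]
-- ===== Notes on version B (the rewrite author's own statement) =====
-- stated objective: alternative
-- what changed: B groups the sorted deduped lowercased words into a dict keyed by word length (setdefault/append) and returns the bucket of the largest key, instead of A's zip-built word->count dict, global max over values and a re-filtering pass over the keys.
import Mathlib
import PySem

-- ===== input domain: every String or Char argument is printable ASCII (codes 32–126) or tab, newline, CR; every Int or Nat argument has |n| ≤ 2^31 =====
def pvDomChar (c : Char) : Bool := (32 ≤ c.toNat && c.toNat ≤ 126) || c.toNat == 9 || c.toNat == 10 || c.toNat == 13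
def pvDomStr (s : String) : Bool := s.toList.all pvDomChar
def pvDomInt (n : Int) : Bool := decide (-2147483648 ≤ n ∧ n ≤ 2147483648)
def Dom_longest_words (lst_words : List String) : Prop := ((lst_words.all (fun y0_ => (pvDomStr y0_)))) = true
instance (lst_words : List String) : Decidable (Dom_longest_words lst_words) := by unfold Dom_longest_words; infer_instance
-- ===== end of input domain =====

-- B groups the sorted deduped lowercased words into a length-keyed bucket dict and returns
-- the bucket of the largest key, instead of A's zip-built word->count dict + global max + re-filter
-- (objective: alternative decomposition, same asymptotic cost).

-- ===== PORT A =====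
def longest_words (lst_words : List String) : List String :=
  let key : PySem.Set String := PySem.Set.ofList (lst_words.map (fun v => PySem.Str.lower v))
  let keys := PySem.List.sorted key (fun x => x) false
  let counts : List Int := keys.map (fun word => ((word.toList.map (fun v => v)).length : Int))
  let dict_word_counts : PySem.Dict String Int :=
    (keys.zip counts).foldl (fun d kv => d.insert kv.1 kv.2) PySem.Dict.empty
  match PySem.List.max? dict_word_counts.values (fun v => v) with
  | none => []  -- Python: max() raises ValueError; excluded by Pre_
  | some longest_word_length =>
      dict_word_counts.keys.filter (fun w => PySem.Str.len w == longest_word_length)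

-- ===== PORT B =====
def longest_words_alt (lst_words : List String) : List String :=
  let buckets : PySem.Dict Int (List String) :=
    (PySem.List.sorted (PySem.Set.ofList (lst_words.map (fun v => PySem.Str.lower v)))
        (fun x => x) false).foldl
      (fun b word => b.insert (PySem.Str.len word) (b.getD (PySem.Str.len word) [] ++ [word]))
      PySem.Dict.empty
  match PySem.List.max? buckets.keys (fun k => k) with
  | none => []  -- Python: max() raises ValueError; excluded by Pre_
  | some m => buckets.getD m []

-- ===== PRECONDITION & SPEC =====
-- Pre_ excludes only the empty list, on which both Pythons raise ValueError (max() of an empty sequence).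
def Pre_longest_words (lst_words : List String) : Prop := lst_words ≠ []
instance (lst_words : List String) : Decidable (Pre_longest_words lst_words) := by
  unfold Pre_longest_words; infer_instance
def pvWitness_longest_words : List String := (["ab", "Cd", "e"])
def Spec_longest_words (lst_words : List String) (out : List String) : Prop := out = longest_words_alt lst_words
instance (lst_words : List String) (out : List String) : Decidable (Spec_longest_words lst_words out) := by unfold Spec_longest_words; infer_instance

-- ===== CLAIM (what is proved, stated in full; the proofs are below) =====
def Claim_equal_longest_words : Prop := ∀ (lst_words : List String), Dom_longest_words lst_words → Pre_longest_words lst_words → Spec_longest_words lst_words (longest_words lst_words)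

-- ===== LEMMAS AND PROOFS =====

-- the bucket dict's entry for k collects exactly the words of length k, in order
lemma buckets_getD (S : List String) (d : PySem.Dict Int (List String)) (k : Int) :
    ((S.foldl (fun b word => b.insert (PySem.Str.len word)
        (b.getD (PySem.Str.len word) [] ++ [word])) d).getD k [])
      = d.getD k [] ++ S.filter (fun w => PySem.Str.len w == k) := by
  induction S generalizing d with
  | nil => simp
  | cons w t ih =>
      rw [List.foldl_cons, ih, PySem.Dict.getD_insert, List.filter_cons]
      by_cases h : PySem.Str.len w = k
      · simp [← h]
      · have h' : ((w.length : Int)) ≠ k := by simpa [PySem.Str.len] using h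
        simp [h', Ne.symm h']

-- zipping a list with its own image: pointwise pairs
lemma zip_self_map (l : List String) (f : String → Int) :
    l.zip (l.map f) = l.map (fun w => (w, f w)) := by
  induction l with
  | nil => rfl
  | cons a t ih => simp [ih]

-- max (no key) over two integer lists with the same members agree
lemma max_id_eq_of_same_mem (xs ys : List Int) (h : ∀ x, x ∈ xs ↔ x ∈ ys) :
    PySem.List.max? xs (fun v => v) = PySem.List.max? ys (fun v => v) := by
  cases hx : PySem.List.max? xs (fun v => v) with
  | none =>
      have hxe : xs = [] := (PySem.List.max?_eq_none_iff _ _).1 hx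
      have hye : ys = [] := by
        cases ys with
        | nil => rfl
        | cons y t => exact absurd ((h y).2 (by simp)) (by simp [hxe])
      rw [hye, (PySem.List.max?_eq_none_iff ([] : List Int) (fun v => v)).2 rfl]
  | some m =>
      have hm : m ∈ ys := (h m).1 (PySem.List.max?_mem hx)
      cases hy : PySem.List.max? ys (fun v => v) with
      | none =>
          have : ys = [] := (PySem.List.max?_eq_none_iff _ _).1 hy
          simp [this] at hm
      | some m' =>
          have h1 : m ≤ m' := PySem.List.max?_isMax hy m hm
          have h2 : m' ≤ m :=
            PySem.List.max?_isMax hx m' ((h m').2 (PySem.List.max?_mem hy))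
          rw [le_antisymm h1 h2]

theorem longest_words_equal (lst_words : List String) :
    longest_words lst_words = longest_words_alt lst_words := by
  simp only [longest_words, longest_words_alt]
  have hcount : (fun word : String => (((word.toList.map (fun v => v)).length : Int)))
      = PySem.Str.len := by
    funext w; simp [PySem.Str.len]
  rw [hcount]
  set S := PySem.List.sorted
      (PySem.Set.ofList (lst_words.map (fun v => PySem.Str.lower v))) (fun x => x) false with hS
  have hnd : S.Nodup :=
    ((PySem.List.sorted_perm _ _ _).nodup_iff).2 (PySem.Set.nodup_ofList _)
  have hzip : (S.zip (S.map PySem.Str.len)) = S.map (fun w => (w, PySem.Str.len w)) :=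
    zip_self_map S PySem.Str.len
  have hitems : ((S.zip (S.map PySem.Str.len)).foldl
      (fun d kv => d.insert kv.1 kv.2) PySem.Dict.empty).items
      = S.map (fun w => (w, PySem.Str.len w)) := by
    rw [hzip]
    have := PySem.Dict.items_foldl_insert_fresh
      (l := S.map (fun w => (w, PySem.Str.len w))) (k := Prod.fst) (v := Prod.snd)
      (d := PySem.Dict.empty) (by simp) (by simpa [List.map_map, Function.comp_def] using hnd)
    simpa [List.map_map, Function.comp_def] using this
  have hkeys : ((S.zip (S.map PySem.Str.len)).foldl
      (fun d kv => d.insert kv.1 kv.2) PySem.Dict.empty).keys = S := by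
    simp [PySem.Dict.keys, hitems, List.map_map, Function.comp_def]
  have hvals : ((S.zip (S.map PySem.Str.len)).foldl
      (fun d kv => d.insert kv.1 kv.2) PySem.Dict.empty).values
      = S.map PySem.Str.len := by
    simp [PySem.Dict.values, hitems, List.map_map, Function.comp_def]
  have hbkeys : ((S.foldl (fun b word => b.insert (PySem.Str.len word)
        (b.getD (PySem.Str.len word) [] ++ [word])) PySem.Dict.empty)).keys
      = PySem.Set.ofList (S.map PySem.Str.len) := by
    have := PySem.Dict.keys_foldl_insert_key (l := S) (key := PySem.Str.len)
      (f := fun b word => b.getD (PySem.Str.len word) [] ++ [word]) (d := PySem.Dict.empty)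
    simpa [PySem.Dict.keys_empty, PySem.Set.update, PySem.Set.ofList_eq_foldl] using this
  have hmax : PySem.List.max? (S.map PySem.Str.len) (fun v => v)
      = PySem.List.max? (PySem.Set.ofList (S.map PySem.Str.len)) (fun k => k) :=
    max_id_eq_of_same_mem _ _ (fun x => by simp [PySem.Set.mem_ofList])
  rw [hvals, hkeys, hbkeys, ← hmax]
  cases hmx : PySem.List.max? (S.map PySem.Str.len) (fun v => v) with
  | none => rfl
  | some m =>
      show S.filter (fun w => PySem.Str.len w == m)
          = ((S.foldl (fun b word => b.insert (PySem.Str.len word)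
              (b.getD (PySem.Str.len word) [] ++ [word])) PySem.Dict.empty)).getD m []
      rw [buckets_getD S PySem.Dict.empty m, PySem.Dict.getD_empty, List.nil_append]

-- ===== VERDICT (by name: the statement is the Claim_ definition above) =====
theorem longest_words_spec : Claim_equal_longest_words := by
  intro lst_words _ _
  unfold Spec_longest_words
  exact longest_words_equal lst_words
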